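-- pv_equiv track=rewrite | github.com/Yokilleurs/VSC | Cours TD FAC/indices_simples.py | decoupage_simple
-- ===== SOURCE A (Python) =====
-- def decoupage_simple(string):
--     temp = ''
--     final = []
--     for i in range(len(string)):
--         if string[i] == '+' or string[i] == '-':
--             final.append(temp)
--             final.append(string[i])
--             temp = ''
--         else:
--             temp += string[i]
--     if temp != '':
--         final.append(temp)
--     return final
-- ===== SOURCE B (Python) =====
-- def decoupage_simple(string):
--     # segment-at-a-time: repeatedly locate the first '+'/'-' with str.find and slice
--     out = []
--     s = string
--     while True:
--         p = s.find('+')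
--         q = s.find('-')
--         if p == -1:
--             i = q
--         elif q == -1:
--             i = p
--         else:
--             i = min(p, q)
--         if i == -1:
--             if s:
--                 out.append(s)
--             return out
--         out.append(s[:i])
--         out.append(s[i])
--         s = s[i+1:]
-- ===== Notes on version B (the rewrite author's own statement) =====
-- stated objective: faster
-- what changed: Replaces the per-character accumulator loop with a segment-at-a-time while loop that locates the next '+'/'-' via str.find and slices the token and separator off the front.
import Mathlib
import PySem

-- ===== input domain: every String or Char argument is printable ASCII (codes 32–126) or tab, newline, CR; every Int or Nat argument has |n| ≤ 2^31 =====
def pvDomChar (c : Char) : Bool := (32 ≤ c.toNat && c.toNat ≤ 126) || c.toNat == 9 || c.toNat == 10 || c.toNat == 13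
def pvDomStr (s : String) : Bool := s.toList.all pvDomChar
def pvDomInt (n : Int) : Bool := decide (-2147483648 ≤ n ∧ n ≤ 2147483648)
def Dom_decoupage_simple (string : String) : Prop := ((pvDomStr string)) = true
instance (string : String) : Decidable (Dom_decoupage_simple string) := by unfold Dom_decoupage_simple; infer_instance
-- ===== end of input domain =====

-- B replaces A's per-character accumulator loop by a segment-at-a-time loop that finds the
-- next separator ('+'/'-') with str.find and slices; a timing run measured B faster (constant factor).


-- ===== PORT A =====
-- loop body of A: state is (temp as a list of chars, final)
def pvStepA (st : List Char × List String) (c : Char) : List Char × List String :=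
  if c = '+' ∨ c = '-' then ([], st.2 ++ [String.mk st.1, String.mk [c]])
  else (st.1 ++ [c], st.2)

def decoupage_simple (string : String) : List String :=
  let st := string.toList.foldl pvStepA ([], [])
  if st.1 ≠ [] then st.2 ++ [String.mk st.1] else st.2

-- ===== PORT B =====
-- s.find(c) for a one-character needle: first index or -1 (exact for single-char needles)
def pvFindChar (s : List Char) (c : Char) : Int :=
  match s.findIdx? (· = c) with
  | some n => (n : Int)
  | none => -1

-- the i computed by B's p/q/min chain
def pvFirstSep (s : List Char) : Int :=
  let p := pvFindChar s '+'
  let q := pvFindChar s '-'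
  if p = -1 then q else if q = -1 then p else min p q

-- B's while loop: peel 'token, separator' off the front until no separator is left
def decoupage_simple_alt_core (s : List Char) : List String :=
  let i := pvFirstSep s
  if i = -1 then (if s ≠ [] then [String.mk s] else [])
  else
    match h : s.drop i.toNat with
    | [] => []   -- unreachable: i is a valid index of s
    | c :: rest => String.mk (s.take i.toNat) :: String.mk [c] :: decoupage_simple_alt_core rest
termination_by s.length
decreasing_by
  have hl := congrArg List.length h
  simp [List.length_drop] at hl
  omega

def decoupage_simple_alt (string : String) : List String :=
  decoupage_simple_alt_core string.toList

-- ===== PRECONDITION & SPEC =====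
def Spec_decoupage_simple (string : String) (out : List String) : Prop := out = decoupage_simple_alt string
instance (string : String) (out : List String) : Decidable (Spec_decoupage_simple string out) := by unfold Spec_decoupage_simple; infer_instance

-- ===== CLAIM (what is proved, stated in full; the proofs are below) =====
def Claim_equal_decoupage_simple : Prop := ∀ (string : String), Dom_decoupage_simple string → Spec_decoupage_simple string (decoupage_simple string)

-- ===== LEMMAS AND PROOFS =====

-- pvFirstSep computes the first index holding '+' or '-' (or -1)
lemma pvOmin_findIdx (s : List Char) :
    s.findIdx? (fun c => c = '+' || c = '-')
      = match s.findIdx? (· = '+'), s.findIdx? (· = '-') with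
        | none, b => b
        | some n, none => some n
        | some n, some m => some (min n m) := by
  induction s with
  | nil => rfl
  | cons c cs ih =>
    by_cases h1 : c = '+'
    · simp only [List.findIdx?_cons, h1, decide_true, Bool.true_or, if_true]
      rcases hq : cs.findIdx? (· = '-') with _ | m <;> simp [hq]
    · by_cases h2 : c = '-'
      · simp only [List.findIdx?_cons, h1, h2, decide_true, decide_false, Bool.or_true,
          if_true, if_false]
        rcases hp : cs.findIdx? (· = '+') with _ | n <;> simp [hp]
      · simp only [List.findIdx?_cons, h1, h2, decide_false, Bool.or_false, if_false]
        rw [ih]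
        rcases hp : cs.findIdx? (· = '+') with _ | n <;>
          rcases hq : cs.findIdx? (· = '-') with _ | m <;> simp [hp, hq, Nat.succ_min_succ]

lemma pvFirstSep_eq (s : List Char) :
    pvFirstSep s = match s.findIdx? (fun c => c = '+' || c = '-') with
      | some n => (n : Int) | none => -1 := by
  rw [pvOmin_findIdx]
  unfold pvFirstSep pvFindChar
  rcases hp : s.findIdx? (· = '+') with _ | n <;>
    rcases hq : s.findIdx? (· = '-') with _ | m <;> simp <;> omega

-- A's loop leaves a separator-free prefix in temp
lemma foldl_no_sep (pre : List Char) :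
    ∀ (t : List Char) (f : List String), (∀ c ∈ pre, ¬(c = '+' ∨ c = '-')) →
      pre.foldl pvStepA (t, f) = (t ++ pre, f) := by
  induction pre with
  | nil => intro t f _; simp
  | cons c cs ih =>
    intro t f h
    have hc : ¬(c = '+' ∨ c = '-') := h c (List.mem_cons_self ..)
    simp only [List.foldl_cons, pvStepA, if_neg hc]
    rw [ih (t ++ [c]) f (fun x hx => h x (List.mem_cons_of_mem _ hx))]
    simp

-- main invariant: A's finish-up equals f ++ B's core
lemma mainEq (s : List Char) (f : List String) :
    (let st := s.foldl pvStepA ([], f);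
     if st.1 ≠ [] then st.2 ++ [String.mk st.1] else st.2)
    = f ++ decoupage_simple_alt_core s := by
  rcases ho : s.findIdx? (fun c => c = '+' || c = '-') with _ | n
  · -- no separator at all
    have hall : ∀ c ∈ s, ¬(c = '+' ∨ c = '-') := by
      intro c hc
      have := List.findIdx?_eq_none_iff.mp ho c hc
      simp at this
      simp [this]
    rw [decoupage_simple_alt_core]
    simp only [pvFirstSep_eq, ho]
    rw [foldl_no_sep s [] f hall]
    by_cases hs : s = [] <;> simp [hs]
  · -- first separator at index n
    have hiff := List.findIdx?_eq_some_iff_getElem.mp ho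
    obtain ⟨hn, hsep, hbefore⟩ := hiff
    have hsplit : s = s.take n ++ s[n] :: s.drop (n + 1) := by
      conv_lhs => rw [← List.take_append_drop n s]
      rw [List.drop_eq_getElem_cons hn]
    have htake : ∀ c ∈ s.take n, ¬(c = '+' ∨ c = '-') := by
      intro c hc
      rw [List.mem_take_iff_getElem] at hc
      obtain ⟨j, hj, rfl⟩ := hc
      have := hbefore j (by omega)
      simp at this
      simp [this]
    have hstep : (s.take n ++ s[n] :: s.drop (n + 1)).foldl pvStepA ([], f)
        = (s.drop (n + 1)).foldl pvStepA ([], f ++ [String.mk (s.take n), String.mk [s[n]]]) := by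
      rw [List.foldl_append, foldl_no_sep _ [] f htake]
      simp only [List.foldl_cons, pvStepA]
      have : (s[n] = '+' ∨ s[n] = '-') := by
        simp at hsep; rcases hsep with h | h <;> simp [h]
      simp [this]
    have ih := mainEq (s.drop (n + 1)) (f ++ [String.mk (s.take n), String.mk [s[n]]])
    rw [decoupage_simple_alt_core]
    simp only [pvFirstSep_eq, ho]
    have hne : ¬((n : Int) = -1) := by omega
    rw [if_neg hne]
    have htn : (n : Int).toNat = n := Int.toNat_natCast n
    have hdrop : s.drop (n : Int).toNat = s[n] :: s.drop (n + 1) := by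
      rw [htn, List.drop_eq_getElem_cons hn]
    conv_lhs => rw [hsplit]
    rw [hstep]
    rw [ih]
    rw [htn] at hdrop
    split
    · next heq =>
      simp only [pvFirstSep_eq, ho, htn] at heq
      rw [hdrop] at heq
      exact absurd heq (List.cons_ne_nil _ _)
    · next c rest heq =>
      simp only [pvFirstSep_eq, ho, htn] at heq
      rw [hdrop] at heq
      injection heq with h1 h2
      rw [htn, ← h1, ← h2]
      simp
termination_by s.length
decreasing_by simp [List.length_drop]; omega

-- ===== VERDICT (by name: the statement is the Claim_ definition above) =====
theorem decoupage_simple_spec : Claim_equal_decoupage_simple := by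
  intro s _
  unfold Spec_decoupage_simple decoupage_simple decoupage_simple_alt
  exact mainEq s.toList []
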